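-- pv_equiv track=rewrite | github.com/valentinogirini/ayed1-2025-tps | TP4/ejercicio3.py | separar_claves
-- ===== SOURCE A (Python) =====
-- from typing import Tuple
--
-- def separar_claves(clave_maestra: str) -> Tuple[str, str]:
--     """
--     Separa la clave maestra en dos claves: una con los dígitos en posiciones impares
--     y otra con los dígitos en posiciones pares.
--
--     Precondición: clave_maestra es una cadena que contiene sólo dígitos y no es vacía.
--
--     Postcondición: retorna una tupla (clave1, clave2) donde cada elemento es la cadena
--                     formada por los dígitos correspondientes.
--     """
--     impares = []
--     pares = []
--     for pos, dig in enumerate(clave_maestra, start=1):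
--         if pos % 2 == 1:
--             impares.append(dig)
--         else:
--             pares.append(dig)
--     return ("".join(impares), "".join(pares))
-- ===== SOURCE B (Python) =====
-- def separar_claves(clave_maestra):
--     return (clave_maestra[::2], clave_maestra[1::2])
-- ===== Notes on version B (the rewrite author's own statement) =====
-- stated objective: idiomatic
-- what changed: Replaces the enumerate loop branching on position parity into two list accumulators by two stride-2 slices clave_maestra[::2] and clave_maestra[1::2].
import Mathlib
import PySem

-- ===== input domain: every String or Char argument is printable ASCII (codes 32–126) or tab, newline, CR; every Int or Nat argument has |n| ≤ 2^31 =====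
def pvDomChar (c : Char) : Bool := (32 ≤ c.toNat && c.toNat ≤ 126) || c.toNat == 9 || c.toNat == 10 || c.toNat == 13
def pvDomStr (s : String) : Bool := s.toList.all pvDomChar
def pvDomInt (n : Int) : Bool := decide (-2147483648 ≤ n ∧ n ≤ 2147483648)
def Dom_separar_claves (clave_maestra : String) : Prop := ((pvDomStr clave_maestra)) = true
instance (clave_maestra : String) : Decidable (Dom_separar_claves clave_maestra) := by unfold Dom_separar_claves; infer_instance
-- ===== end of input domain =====

-- B replaces A's enumerate loop (branching on position parity into two accumulators)
-- by two stride-2 slices s[::2] / s[1::2]; idiomatic, same O(n) cost.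


-- ===== PORT A =====
-- loop body: if pos % 2 == 1 append to impares else to pares
def separar_claves (clave_maestra : String) : String × String :=
  let r := (PySem.List.enumerate clave_maestra.toList 1).foldl
    (fun (acc : List Char × List Char) pd =>
      if PySem.Int.mod pd.1 2 == 1 then (acc.1 ++ [pd.2], acc.2)
      else (acc.1, acc.2 ++ [pd.2]))
    ([], [])
  (String.ofList r.1, String.ofList r.2)

-- ===== PORT B =====
-- (clave_maestra[::2], clave_maestra[1::2]); step ≠ 0 so slice? is always `some`
def separar_claves_alt (clave_maestra : String) : String × String :=
  ((PySem.Str.slice? clave_maestra none none 2).getD "",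
   (PySem.Str.slice? clave_maestra (some 1) none 2).getD "")

-- ===== PRECONDITION & SPEC =====
def Spec_separar_claves (clave_maestra : String) (out : String × String) : Prop := out = separar_claves_alt clave_maestra
instance (clave_maestra : String) (out : String × String) : Decidable (Spec_separar_claves clave_maestra out) := by unfold Spec_separar_claves; infer_instance

-- ===== CLAIM (what is proved, stated in full; the proofs are below) =====
def Claim_equal_separar_claves : Prop := ∀ (clave_maestra : String), Dom_separar_claves clave_maestra → Spec_separar_claves clave_maestra (separar_claves clave_maestra)

-- ===== LEMMAS AND PROOFS =====

-- elements at even indices (1-based odd positions)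
def pvEvens {α : Type} : List α → List α
  | [] => []
  | [a] => [a]
  | a :: _ :: t => a :: pvEvens t

-- elements at odd indices (1-based even positions)
def pvOdds {α : Type} : List α → List α
  | [] => []
  | [_] => []
  | _ :: b :: t => b :: pvOdds t

theorem pvFilterMap_evens {α : Type} (cs : List α) :
    List.filterMap (fun k => cs[2 * k]?) (List.range ((cs.length + 1) / 2)) = pvEvens cs := by
  induction cs using pvEvens.induct with
  | case1 => simp [pvEvens]
  | case2 a => simp [pvEvens]
  | case3 a b t ih =>
      have hlen : ((a :: b :: t).length + 1) / 2 = (t.length + 1) / 2 + 1 := by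
        simp; omega
      rw [hlen, List.range_succ_eq_map]
      simp only [List.filterMap_cons, List.filterMap_map]
      simp only [pvEvens]
      rw [← ih]
      simp [Function.comp, Nat.mul_succ]

theorem pvFilterMap_odds {α : Type} (cs : List α) :
    List.filterMap (fun k => cs[1 + 2 * k]?) (List.range (cs.length / 2)) = pvOdds cs := by
  induction cs using pvOdds.induct with
  | case1 => simp [pvOdds]
  | case2 a => simp [pvOdds]
  | case3 a b t ih =>
      have hlen : (a :: b :: t).length / 2 = t.length / 2 + 1 := by
        simp; omega
      rw [hlen, List.range_succ_eq_map]
      simp only [List.filterMap_cons, List.filterMap_map]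
      simp only [pvOdds]
      rw [← ih]
      have hf : ∀ k : Nat, (a :: b :: t)[1 + 2 * (k + 1)]? = t[1 + 2 * k]? := by
        intro k
        have h3 : 1 + 2 * (k + 1) = (1 + 2 * k) + 1 + 1 := by omega
        rw [h3]
        simp
      simp [Function.comp, hf]

theorem pvSlice2_evens {α : Type} (cs : List α) :
    PySem.List.slice? cs none none 2 = some (pvEvens cs) := by
  simp only [PySem.List.slice?, PySem.List.sliceIndices]
  norm_num
  rw [← pvFilterMap_evens cs]
  by_cases h : 0 < cs.length
  · rw [if_pos h]
    have hc : ((((cs.length : Int)) + 2 - 1) / 2).toNat = (cs.length + 1) / 2 := by omega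
    rw [hc]
    congr 1
  · rw [if_neg h]
    have h0 : cs.length = 0 := by omega
    simp [h0]

theorem pvSlice2_odds {α : Type} (cs : List α) :
    PySem.List.slice? cs (some 1) none 2 = some (pvOdds cs) := by
  simp only [PySem.List.slice?, PySem.List.sliceIndices]
  norm_num
  rw [← pvFilterMap_odds cs]
  by_cases h : (1 : Int) ≤ (cs.length : Int)
  · have hmin : min (1 : Int) (cs.length : Int) = 1 := by omega
    rw [hmin]
    by_cases h2 : 1 < cs.length
    · rw [if_pos h2]
      have hc : ((((cs.length : Int)) - 1 + 2 - 1) / 2).toNat = cs.length / 2 := by omega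
      rw [hc]
      congr 1
    · rw [if_neg h2]
      have h1 : cs.length = 1 := by omega
      have hz : cs.length / 2 = 0 := by omega
      simp [hz]
  · have h0 : cs.length = 0 := by omega
    have hmin : min (1 : Int) (cs.length : Int) = 0 := by omega
    rw [hmin]
    simp [h0]

theorem pvFoldl_enum {α : Type} (t : List α) :
    ∀ (s : Int) (i p : List α), s % 2 = 1 →
    (PySem.List.enumerate t s).foldl
      (fun (acc : List α × List α) pd =>
        if PySem.Int.mod pd.1 2 == 1 then (acc.1 ++ [pd.2], acc.2)
        else (acc.1, acc.2 ++ [pd.2]))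
      (i, p) = (i ++ pvEvens t, p ++ pvOdds t) := by
  induction t using pvEvens.induct with
  | case1 => intro s i p hs; simp [PySem.List.enumerate, pvEvens, pvOdds]
  | case2 a =>
      intro s i p hs
      simp [PySem.List.enumerate, pvEvens, pvOdds, hs]
  | case3 a b t ih =>
      intro s i p hs
      have e1 : (PySem.Int.mod s 2 == 1) = true := by simp [hs]
      have e2 : (PySem.Int.mod (s + 1) 2 == 1) = false := by
        simp; omega
      have hs2 : (s + 1 + 1) % 2 = 1 := by omega
      simp only [PySem.List.enumerate, List.foldl_cons, e1, e2, if_true, if_false,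
        Bool.false_eq_true]
      rw [ih (s + 1 + 1) _ _ hs2]
      simp [pvEvens, pvOdds]

-- ===== VERDICT (by name: the statement is the Claim_ definition above) =====
theorem separar_claves_spec : Claim_equal_separar_claves := by
  intro s _
  unfold Spec_separar_claves separar_claves separar_claves_alt
  rw [pvFoldl_enum s.toList 1 [] [] (by decide)]
  simp only [PySem.Str.slice?, PySem.Chars.slice?, pvSlice2_evens, pvSlice2_odds]
  simp
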